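-- pv_equiv track=rewrite | github.com/haobinzheng/mcp_codes | bng/tools/sros_rootifier.py | clean_config
-- ===== SOURCE A (Python) =====
-- def clean_config(lines):
--     """
--     Remove all lines before the first real configuration block.
--     This skips:
--     - Everything before 'configure' if it's immediately followed by a header block.
--     - Or everything before the header block itself.
--     """
--     start_index = 0
--     for i in range(len(lines)):
--         line = lines[i].strip().replace('\\"', '"')
--         next_1 = lines[i + 1].strip().replace('\\"', '"') if i + 1 < len(lines) else ""
--         next_2 = lines[i + 2].strip().replace('\\"', '"') if i + 2 < len(lines) else ""
--         next_3 = lines[i + 3].strip().replace('\\"', '"') if i + 3 < len(lines) else ""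
--
--         # Case 1: header block
--         if i + 2 < len(lines):
--             if (line == "#--------------------------------------------------" and
--                 next_1 == 'echo "System Configuration"' and
--                 next_2 == "#--------------------------------------------------"):
--                 start_index = i + 3
--                 break
--
--         # Case 2: 'configure' followed by header block
--         if (line == "configure" and
--             i + 3 < len(lines) and
--             next_1 == "#--------------------------------------------------" and
--             next_2 == 'echo "System Configuration"' and
--             next_3 == "#--------------------------------------------------"):
--             start_index = i + 4
--             break
--
--         # Fallback: just 'configure'
--         if line == "configure":
--             start_index = i
--             break
--
--     return lines[start_index:]
-- ===== SOURCE B (Python) =====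
-- HDR = "#--------------------------------------------------"
-- ECHO = 'echo "System Configuration"'
--
-- def clean_config(lines):
--     """Two-anchor version: locate the first header triple and the first
--     'configure' line once, then compute the start index arithmetically."""
--     norm = [l.strip().replace('\\"', '"') for l in lines]
--     n = len(norm)
--     h = next((i for i in range(n - 2)
--               if norm[i] == HDR and norm[i + 1] == ECHO and norm[i + 2] == HDR), None)
--     c = next((i for i, l in enumerate(norm) if l == "configure"), None)
--     if c is not None and (h is None or c < h):
--         start = c + 4 if h == c + 1 else c
--     elif h is not None:
--         start = h + 3
--     else:
--         start = 0
--     return lines[start:]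
-- ===== Notes on version B (the rewrite author's own statement) =====
-- stated objective: alternative
-- what changed: A's single scan that checks four break conditions at every index is replaced by two independent anchor searches (first header triple, first normalized 'configure' line) whose results are combined arithmetically into the start index.
import Mathlib
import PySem

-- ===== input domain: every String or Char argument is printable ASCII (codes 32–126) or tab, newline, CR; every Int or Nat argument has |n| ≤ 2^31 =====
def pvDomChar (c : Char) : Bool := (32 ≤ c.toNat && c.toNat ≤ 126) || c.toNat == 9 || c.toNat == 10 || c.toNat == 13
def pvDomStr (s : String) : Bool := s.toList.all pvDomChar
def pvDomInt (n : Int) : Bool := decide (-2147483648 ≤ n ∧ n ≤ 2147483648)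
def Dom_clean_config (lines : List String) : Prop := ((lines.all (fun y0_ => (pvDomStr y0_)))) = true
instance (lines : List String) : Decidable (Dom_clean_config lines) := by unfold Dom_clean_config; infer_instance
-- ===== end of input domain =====

-- B replaces A's single four-way scanning loop by two independent anchor searches
-- (first header triple, first 'configure' line) combined arithmetically (objective: alternative decomposition).

-- shared constants / the normalization both Pythons apply to every line
def pvHdr : String := "#--------------------------------------------------"
def pvEcho : String := "echo \"System Configuration\""
def pvNorm (s : String) : String := PySem.Str.replace (PySem.Str.strip s) "\\\"" "\""

-- ===== PORT A =====
def pvLoopA (lines : List String) (i : Nat) : Nat :=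
  if hi : i < lines.length then
    let line := pvNorm (lines.getD i "")
    let next1 := if i + 1 < lines.length then pvNorm (lines.getD (i + 1) "") else ""
    let next2 := if i + 2 < lines.length then pvNorm (lines.getD (i + 2) "") else ""
    let next3 := if i + 3 < lines.length then pvNorm (lines.getD (i + 3) "") else ""
    if i + 2 < lines.length ∧ line = pvHdr ∧ next1 = pvEcho ∧ next2 = pvHdr then i + 3
    else if line = "configure" ∧ i + 3 < lines.length ∧ next1 = pvHdr ∧ next2 = pvEcho ∧ next3 = pvHdr then i + 4
    else if line = "configure" then i
    else pvLoopA lines (i + 1)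
  else 0
termination_by lines.length - i

def clean_config (lines : List String) : List String := lines.drop (pvLoopA lines 0)

-- ===== PORT B =====
-- first index of a header triple in the normalized lines
def pvFindHdr : List String → Option Nat
  | a :: b :: c :: rest =>
      if a = pvHdr ∧ b = pvEcho ∧ c = pvHdr then some 0
      else (pvFindHdr (b :: c :: rest)).map (· + 1)
  | _ => none

-- combine the two anchors into the start index
def pvStart (oc oh : Option Nat) : Nat :=
  match oc, oh with
  | some c, some h => if c < h then (if h = c + 1 then c + 4 else c) else h + 3
  | some c, none => c
  | none, some h => h + 3
  | none, none => 0

def clean_config_alt (lines : List String) : List String :=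
  let norm := lines.map pvNorm
  lines.drop (pvStart (List.findIdx? (· == "configure") norm) (pvFindHdr norm))

-- ===== PRECONDITION & SPEC =====
def Spec_clean_config (lines : List String) (out : List String) : Prop := out = clean_config_alt lines
instance (lines : List String) (out : List String) : Decidable (Spec_clean_config lines out) := by unfold Spec_clean_config; infer_instance

-- ===== CLAIM (what is proved, stated in full; the proofs are below) =====
def Claim_equal_clean_config : Prop := ∀ (lines : List String), Dom_clean_config lines → Spec_clean_config lines (clean_config lines)

-- ===== LEMMAS AND PROOFS =====

-- one-step evaluations of A's loop under each of its branch conditions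
lemma loopA_break1 {lines : List String} {i : Nat} (h2 : i + 2 < lines.length)
    (t1 : pvNorm (lines.getD i "") = pvHdr) (t2 : pvNorm (lines.getD (i+1) "") = pvEcho)
    (t3 : pvNorm (lines.getD (i+2) "") = pvHdr) : pvLoopA lines i = i + 3 := by
  rw [pvLoopA]
  rw [dif_pos (by omega : i < lines.length)]
  rw [if_pos ⟨h2, t1, by rw [if_pos (by omega : i + 1 < lines.length)]; exact t2,
      by rw [if_pos h2]; exact t3⟩]

lemma loopA_break2 {lines : List String} {i : Nat} (h3 : i + 3 < lines.length)
    (c0 : pvNorm (lines.getD i "") = "configure")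
    (u1 : pvNorm (lines.getD (i+1) "") = pvHdr) (u2 : pvNorm (lines.getD (i+2) "") = pvEcho)
    (u3 : pvNorm (lines.getD (i+3) "") = pvHdr) : pvLoopA lines i = i + 4 := by
  rw [pvLoopA]
  rw [dif_pos (by omega : i < lines.length)]
  rw [if_neg (by rintro ⟨-, hh, -⟩; rw [c0] at hh; exact absurd hh (by decide))]
  rw [if_pos ⟨c0, h3, by rw [if_pos (by omega : i + 1 < lines.length)]; exact u1,
      by rw [if_pos (by omega : i + 2 < lines.length)]; exact u2, by rw [if_pos h3]; exact u3⟩]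

lemma loopA_cfg {lines : List String} {i : Nat} (hi : i < lines.length)
    (c0 : pvNorm (lines.getD i "") = "configure")
    (h3 : ¬(i + 3 < lines.length ∧ pvNorm (lines.getD (i+1) "") = pvHdr ∧
        pvNorm (lines.getD (i+2) "") = pvEcho ∧ pvNorm (lines.getD (i+3) "") = pvHdr)) :
    pvLoopA lines i = i := by
  rw [pvLoopA]
  rw [dif_pos hi]
  rw [if_neg (by rintro ⟨-, hh, -⟩; rw [c0] at hh; exact absurd hh (by decide))]
  rw [if_neg (by
    rintro ⟨-, hb, v1, v2, v3⟩
    rw [if_pos (by omega : i + 1 < lines.length)] at v1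
    rw [if_pos (by omega : i + 2 < lines.length)] at v2
    rw [if_pos hb] at v3
    exact h3 ⟨hb, v1, v2, v3⟩)]
  rw [if_pos c0]

lemma loopA_step {lines : List String} {i : Nat} (hi : i < lines.length)
    (c0 : pvNorm (lines.getD i "") ≠ "configure")
    (hntrip : ¬(i + 2 < lines.length ∧ pvNorm (lines.getD i "") = pvHdr ∧
        pvNorm (lines.getD (i+1) "") = pvEcho ∧ pvNorm (lines.getD (i+2) "") = pvHdr)) :
    pvLoopA lines i = pvLoopA lines (i + 1) := by
  rw [pvLoopA]
  rw [dif_pos hi]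
  rw [if_neg (by
    rintro ⟨hb, v1, v2, v3⟩
    rw [if_pos (by omega : i + 1 < lines.length)] at v2
    rw [if_pos hb] at v3
    exact hntrip ⟨hb, v1, v2, v3⟩)]
  rw [if_neg (by rintro ⟨hc, -⟩; exact c0 hc)]
  rw [if_neg c0]

-- A's loop from index i, expressed via B's anchors on the tail: 0 when neither anchor
-- exists past i, otherwise i plus B's combination of the tail-relative anchors.
def pvStart' (i : Nat) (oc oh : Option Nat) : Nat :=
  match oc, oh with
  | none, none => 0
  | oc, oh => i + pvStart oc oh

lemma pvStart'_shift (i : Nat) (oc oh : Option Nat) :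
    pvStart' i (oc.map (· + 1)) (oh.map (· + 1)) = pvStart' (i + 1) oc oh := by
  cases oc <;> cases oh <;> simp [pvStart', pvStart] <;> (try split_ifs) <;> omega

lemma pvFindHdr_short (l : List String) (h : l.length < 3) : pvFindHdr l = none := by
  match l with
  | [] => rfl
  | [_] => rfl
  | [_, _] => rfl
  | _ :: _ :: _ :: _ => simp at h; omega

lemma pvStart'_hdr0 (i : Nat) (oc : Option Nat) : pvStart' i oc (some 0) = i + 3 := by
  cases oc <;> simp [pvStart', pvStart]

lemma pvStart'_cfg0_shape (i : Nat) (o : Option Nat) :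
    pvStart' i (some 0) (Option.map (fun j => j + 1) (Option.map (fun j => j + 1) o)) = i := by
  cases o <;> simp [pvStart', pvStart]

set_option maxHeartbeats 1000000 in
lemma pvLoopA_eq (k : Nat) (lines : List String) (i : Nat) (hk : lines.length - i ≤ k) :
    pvLoopA lines i =
      pvStart' i (List.findIdx? (· == "configure") ((lines.map pvNorm).drop i))
                 (pvFindHdr ((lines.map pvNorm).drop i)) := by
  induction k generalizing i with
  | zero =>
    have hge : lines.length ≤ i := by omega
    rw [pvLoopA]
    rw [List.drop_eq_nil_of_le (by simpa using hge)]
    simp [Nat.not_lt.mpr hge, pvStart', pvFindHdr]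
  | succ k ih =>
    by_cases hi : i < lines.length
    · have dcons : ∀ j, j < lines.length →
          (lines.map pvNorm).drop j = pvNorm (lines.getD j "") :: (lines.map pvNorm).drop (j + 1) := by
        intro j hj
        rw [List.drop_eq_getElem_cons (by simpa using hj)]
        simp [List.getD, List.getElem?_eq_getElem hj]
      by_cases h2 : i + 2 < lines.length
      · have h1 : i + 1 < lines.length := by omega
        by_cases htrip : pvNorm (lines.getD i "") = pvHdr ∧ pvNorm (lines.getD (i+1) "") = pvEcho ∧
            pvNorm (lines.getD (i+2) "") = pvHdr
        · obtain ⟨t1, t2, t3⟩ := htrip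
          have hB0 : pvFindHdr ((lines.map pvNorm).drop i) = some 0 := by
            rw [dcons i hi, dcons (i+1) h1, dcons (i+2) h2]
            simp only [pvFindHdr]
            rw [if_pos (show pvNorm (lines.getD i "") = pvHdr ∧ pvNorm (lines.getD (i+1) "") = pvEcho ∧
                pvNorm (lines.getD (i+2) "") = pvHdr from ⟨t1, t2, t3⟩)]
          rw [loopA_break1 h2 t1 t2 t3, hB0, pvStart'_hdr0]
        · by_cases hcfg : pvNorm (lines.getD i "") = "configure"
          · have hnothdr : ¬(pvNorm (lines.getD i "") = pvHdr ∧ pvNorm (lines.getD (i+1) "") = pvEcho ∧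
                pvNorm (lines.getD (i+2) "") = pvHdr) := by
              rintro ⟨hh, -⟩; rw [hcfg] at hh; exact absurd hh (by decide)
            have hq : (pvNorm (lines.getD i "") == "configure") = true := by
              simp only [hcfg, beq_self_eq_true]
            have hA0 : List.findIdx? (· == "configure") ((lines.map pvNorm).drop i) = some 0 := by
              rw [dcons i hi, List.findIdx?_cons]
              simp only [hq]
              rw [if_pos trivial]
            by_cases h3 : i + 3 < lines.length ∧ pvNorm (lines.getD (i+1) "") = pvHdr ∧
                pvNorm (lines.getD (i+2) "") = pvEcho ∧ pvNorm (lines.getD (i+3) "") = pvHdr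
            · obtain ⟨hb3, u1, u2, u3⟩ := h3
              have hB1 : pvFindHdr ((lines.map pvNorm).drop i) = some 1 := by
                rw [dcons i hi, dcons (i+1) h1, dcons (i+2) h2, dcons (i+3) hb3]
                simp only [pvFindHdr]
                rw [if_neg hnothdr]
                rw [if_pos (show pvNorm (lines.getD (i+1) "") = pvHdr ∧ pvNorm (lines.getD (i+2) "") = pvEcho ∧
                    pvNorm (lines.getD (i+3) "") = pvHdr from ⟨u1, u2, u3⟩)]
                rfl
              rw [loopA_break2 hb3 hcfg u1 u2 u3, hA0, hB1]
              rfl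
            · by_cases hb3 : i + 3 < lines.length
              · have hB2 : pvFindHdr ((lines.map pvNorm).drop i) =
                    Option.map (fun j => j + 1) (Option.map (fun j => j + 1)
                      (pvFindHdr (pvNorm (lines.getD (i+2) "") :: pvNorm (lines.getD (i+3) "") ::
                        (lines.map pvNorm).drop (i+3+1)))) := by
                  rw [dcons i hi, dcons (i+1) h1, dcons (i+2) h2, dcons (i+3) hb3]
                  simp only [pvFindHdr]
                  rw [if_neg hnothdr]
                  rw [if_neg (show ¬(pvNorm (lines.getD (i+1) "") = pvHdr ∧ pvNorm (lines.getD (i+2) "") = pvEcho ∧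
                      pvNorm (lines.getD (i+3) "") = pvHdr) from fun hcon => h3 ⟨hb3, hcon⟩)]
                rw [loopA_cfg hi hcfg h3, hA0, hB2, pvStart'_cfg0_shape]
              · have hsh : pvFindHdr ((lines.map pvNorm).drop (i+1)) = none := by
                  apply pvFindHdr_short; simp; omega
                have hBn : pvFindHdr ((lines.map pvNorm).drop i) = none := by
                  rw [dcons i hi, dcons (i+1) h1, dcons (i+2) h2]
                  simp only [pvFindHdr]
                  rw [if_neg hnothdr]
                  rw [← dcons (i+2) h2, ← dcons (i+1) h1, hsh]
                  rfl
                rw [loopA_cfg hi hcfg h3, hA0, hBn]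
                rfl
          · -- neither a triple start nor a configure line at i: step to i+1
            have hq : (pvNorm (lines.getD i "") == "configure") = false := by
              simp only [beq_eq_false_iff_ne, ne_eq]; exact hcfg
            have hA : List.findIdx? (· == "configure") ((lines.map pvNorm).drop i) =
                Option.map (fun j => j + 1)
                  (List.findIdx? (· == "configure") ((lines.map pvNorm).drop (i+1))) := by
              rw [dcons i hi, List.findIdx?_cons]
              simp only [hq]
              rw [if_neg (show ¬(false = true) by simp)]
            have hB : pvFindHdr ((lines.map pvNorm).drop i) =
                Option.map (fun j => j + 1) (pvFindHdr ((lines.map pvNorm).drop (i+1))) := by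
              rw [dcons i hi, dcons (i+1) h1, dcons (i+2) h2]
              simp only [pvFindHdr]
              rw [if_neg (show ¬(pvNorm (lines.getD i "") = pvHdr ∧ pvNorm (lines.getD (i+1) "") = pvEcho ∧
                  pvNorm (lines.getD (i+2) "") = pvHdr) from htrip)]
            rw [loopA_step hi hcfg (by rintro ⟨-, hh⟩; exact htrip hh)]
            rw [ih (i+1) (by omega)]
            rw [hA, hB, pvStart'_shift]
      · -- fewer than 3 lines remain past i: no header triple can start here
        have hoh : pvFindHdr ((lines.map pvNorm).drop i) = none := by
          apply pvFindHdr_short; simp; omega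
        have hoh1 : pvFindHdr ((lines.map pvNorm).drop (i+1)) = none := by
          apply pvFindHdr_short; simp; omega
        by_cases hcfg : pvNorm (lines.getD i "") = "configure"
        · have hq : (pvNorm (lines.getD i "") == "configure") = true := by
            simp only [hcfg, beq_self_eq_true]
          have hA0 : List.findIdx? (· == "configure") ((lines.map pvNorm).drop i) = some 0 := by
            rw [dcons i hi, List.findIdx?_cons]
            simp only [hq]
            rw [if_pos trivial]
          rw [loopA_cfg hi hcfg (by rintro ⟨hb, -⟩; omega), hA0, hoh]
          rfl
        · have hq : (pvNorm (lines.getD i "") == "configure") = false := by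
            simp only [beq_eq_false_iff_ne, ne_eq]; exact hcfg
          have hA : List.findIdx? (· == "configure") ((lines.map pvNorm).drop i) =
              Option.map (fun j => j + 1)
                (List.findIdx? (· == "configure") ((lines.map pvNorm).drop (i+1))) := by
            rw [dcons i hi, List.findIdx?_cons]
            simp only [hq, Bool.false_eq_true]
            rw [if_neg not_false]
          have hB : pvFindHdr ((lines.map pvNorm).drop i) =
              Option.map (fun j => j + 1) (pvFindHdr ((lines.map pvNorm).drop (i+1))) := by
            rw [hoh, hoh1]
            rfl
          rw [loopA_step hi hcfg (by rintro ⟨hb, -⟩; omega)]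
          rw [ih (i+1) (by omega)]
          rw [hA, hB, pvStart'_shift]
    · have hge : lines.length ≤ i := by omega
      rw [pvLoopA]
      rw [List.drop_eq_nil_of_le (by simpa using hge)]
      simp [hi, pvStart', pvFindHdr]

-- ===== VERDICT (by name: the statement is the Claim_ definition above) =====
theorem clean_config_spec : Claim_equal_clean_config := by
  intro lines _
  unfold Spec_clean_config clean_config clean_config_alt
  rw [pvLoopA_eq lines.length lines 0 (by omega)]
  cases hc : List.findIdx? (· == "configure") (lines.map pvNorm) <;>
    cases hh : pvFindHdr (lines.map pvNorm) <;>
      simp [pvStart', pvStart, hc, hh]
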